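-- pv_equiv track=rewrite | github.com/rheiland/pc4metastasis | bin/MCMC.py | Constraints_to_hypothesis
-- ===== SOURCE A (Python) =====
-- def Constraints_to_hypothesis(constraints):
--     Hypos = []
--     for hyp in constraints:
--         hypothesis = []
--         if (('K_b = inf' in hyp) or ('K_l = inf' in hyp)): hypothesis.append('EG')
--         else: hypothesis.append('LG')
--         if('tau = 0' in hyp): hypothesis.append('NDI')
--         elif(['tau = 0'] in constraints): hypothesis.append('DI')
--         if('alpha_bg = alpha_br' in hyp): hypothesis.append('H1')
--         if('beta_g = beta_r' in hyp): hypothesis.append('H2a')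
--         elif('beta_g = 1.5*beta_r' in hyp): hypothesis.append('H2b')
--         if('phi_r = phi_g' in hyp): hypothesis.append('H3a')
--         elif('phi_r = 3*phi_g' in hyp): hypothesis.append('H3b')
--         elif('phi_r = 6*phi_g' in hyp): hypothesis.append('H3c')
--         if('f_Eg = 1.0*phi_r/phi_g*f_Er' in hyp): hypothesis.append('H4a')
--         elif('f_Eg = 1.5*phi_r/phi_g*f_Er' in hyp): hypothesis.append('H4b')
--         if('alpha_lg = alpha_lr' in hyp): hypothesis.append('H5')
--         Hypos.append(hypothesis)
--     return Hypos
-- ===== SOURCE B (Python) =====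
-- def Constraints_to_hypothesis(constraints):
--     di = ['tau = 0'] in constraints
--     groups = [
--         ([('K_b = inf', 'EG'), ('K_l = inf', 'EG')], 'LG'),
--         ([('tau = 0', 'NDI')], 'DI' if di else None),
--         ([('alpha_bg = alpha_br', 'H1')], None),
--         ([('beta_g = beta_r', 'H2a'), ('beta_g = 1.5*beta_r', 'H2b')], None),
--         ([('phi_r = phi_g', 'H3a'), ('phi_r = 3*phi_g', 'H3b'), ('phi_r = 6*phi_g', 'H3c')], None),
--         ([('f_Eg = 1.0*phi_r/phi_g*f_Er', 'H4a'), ('f_Eg = 1.5*phi_r/phi_g*f_Er', 'H4b')], None),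
--         ([('alpha_lg = alpha_lr', 'H5')], None),
--     ]
--
--     def label(hyp, pairs, default):
--         for key, lab in pairs:
--             if key in hyp:
--                 return lab
--         return default
--
--     return [[lab for pairs, d in groups
--              if (lab := label(hyp, pairs, d)) is not None]
--             for hyp in constraints]
-- ===== Notes on version B (the rewrite author's own statement) =====
-- stated objective: alternative
-- what changed: Replaces the hardcoded if/elif branch ladder with a data table of (key,label) groups plus one generic first-match lookup loop over it; the list-wide ['tau = 0'] check is hoisted out of the loop as the tau group's default.
import Mathlib
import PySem

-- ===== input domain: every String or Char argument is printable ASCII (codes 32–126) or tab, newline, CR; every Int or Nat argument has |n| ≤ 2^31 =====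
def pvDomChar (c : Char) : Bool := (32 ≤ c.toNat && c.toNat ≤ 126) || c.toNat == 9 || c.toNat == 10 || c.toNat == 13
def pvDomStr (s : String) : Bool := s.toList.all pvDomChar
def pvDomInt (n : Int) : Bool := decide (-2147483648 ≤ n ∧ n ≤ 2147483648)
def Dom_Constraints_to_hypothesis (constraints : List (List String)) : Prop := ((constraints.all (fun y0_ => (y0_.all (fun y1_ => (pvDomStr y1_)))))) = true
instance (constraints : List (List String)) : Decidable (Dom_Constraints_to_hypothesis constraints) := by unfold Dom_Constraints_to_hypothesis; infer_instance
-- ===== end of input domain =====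

-- B replaces A's hardcoded if/elif ladder with a data table of (key,label) groups
-- walked by one generic first-match lookup (alternative decomposition, same cost).

-- ===== PORT A =====
-- literal transliteration of A's loop: accumulate Hypos, build hypothesis by the branch ladder
def Constraints_to_hypothesis (constraints : List (List String)) : List (List String) :=
  constraints.foldl (fun Hypos hyp =>
    let hypothesis : List String := []
    let hypothesis := if hyp.contains "K_b = inf" || hyp.contains "K_l = inf"
                      then hypothesis ++ ["EG"] else hypothesis ++ ["LG"]
    let hypothesis := if hyp.contains "tau = 0" then hypothesis ++ ["NDI"]
                      else if constraints.contains ["tau = 0"] then hypothesis ++ ["DI"]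
                      else hypothesis
    let hypothesis := if hyp.contains "alpha_bg = alpha_br" then hypothesis ++ ["H1"] else hypothesis
    let hypothesis := if hyp.contains "beta_g = beta_r" then hypothesis ++ ["H2a"]
                      else if hyp.contains "beta_g = 1.5*beta_r" then hypothesis ++ ["H2b"]
                      else hypothesis
    let hypothesis := if hyp.contains "phi_r = phi_g" then hypothesis ++ ["H3a"]
                      else if hyp.contains "phi_r = 3*phi_g" then hypothesis ++ ["H3b"]
                      else if hyp.contains "phi_r = 6*phi_g" then hypothesis ++ ["H3c"]
                      else hypothesis
    let hypothesis := if hyp.contains "f_Eg = 1.0*phi_r/phi_g*f_Er" then hypothesis ++ ["H4a"]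
                      else if hyp.contains "f_Eg = 1.5*phi_r/phi_g*f_Er" then hypothesis ++ ["H4b"]
                      else hypothesis
    let hypothesis := if hyp.contains "alpha_lg = alpha_lr" then hypothesis ++ ["H5"] else hypothesis
    Hypos ++ [hypothesis]) []

-- ===== PORT B =====
-- first-match lookup: first label whose key is in hyp, else the group's default
def pvLabel (hyp : List String) (pairs : List (String × String)) (d : Option String) : Option String :=
  match pairs.find? (fun p => hyp.contains p.1) with
  | some p => some p.2
  | none => d

def pvGroups (di : Bool) : List (List (String × String) × Option String) :=
  [ ([("K_b = inf", "EG"), ("K_l = inf", "EG")], some "LG"),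
    ([("tau = 0", "NDI")], if di then some "DI" else none),
    ([("alpha_bg = alpha_br", "H1")], none),
    ([("beta_g = beta_r", "H2a"), ("beta_g = 1.5*beta_r", "H2b")], none),
    ([("phi_r = phi_g", "H3a"), ("phi_r = 3*phi_g", "H3b"), ("phi_r = 6*phi_g", "H3c")], none),
    ([("f_Eg = 1.0*phi_r/phi_g*f_Er", "H4a"), ("f_Eg = 1.5*phi_r/phi_g*f_Er", "H4b")], none),
    ([("alpha_lg = alpha_lr", "H5")], none) ]

def Constraints_to_hypothesis_alt (constraints : List (List String)) : List (List String) :=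
  let di := constraints.contains ["tau = 0"]
  constraints.map (fun hyp => (pvGroups di).filterMap (fun g => pvLabel hyp g.1 g.2))

-- ===== PRECONDITION & SPEC =====
def Spec_Constraints_to_hypothesis (constraints : List (List String)) (out : List (List String)) : Prop := out = Constraints_to_hypothesis_alt constraints
instance (constraints : List (List String)) (out : List (List String)) : Decidable (Spec_Constraints_to_hypothesis constraints out) := by unfold Spec_Constraints_to_hypothesis; infer_instance

-- ===== CLAIM (what is proved, stated in full; the proofs are below) =====
def Claim_equal_Constraints_to_hypothesis : Prop := ∀ (constraints : List (List String)), Dom_Constraints_to_hypothesis constraints → Spec_Constraints_to_hypothesis constraints (Constraints_to_hypothesis constraints)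

-- ===== LEMMAS AND PROOFS =====

-- filterMap over a cons as an Option.toList append (used to split the group table)
theorem pv_fm_cons {α β : Type} (f : α → Option β) (a : α) (l : List α) :
    List.filterMap f (a :: l) = (f a).toList ++ List.filterMap f l := by
  cases h : f a <;> simp [List.filterMap_cons, h]

-- the seven group lookups, as the if-trees A's ladder produces
theorem pv_g1 (hyp : List String) :
    (pvLabel hyp [("K_b = inf", "EG"), ("K_l = inf", "EG")] (some "LG")).toList
      = if (hyp.contains "K_b = inf" || hyp.contains "K_l = inf") = true then ["EG"] else ["LG"] := by
  simp only [pvLabel, List.find?]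
  cases h1 : hyp.contains "K_b = inf" <;> cases h2 : hyp.contains "K_l = inf" <;> simp

theorem pv_g2 (hyp : List String) (di : Bool) :
    (pvLabel hyp [("tau = 0", "NDI")] (if di then some "DI" else none)).toList
      = if hyp.contains "tau = 0" = true then ["NDI"] else if di = true then ["DI"] else [] := by
  simp only [pvLabel, List.find?]
  cases h1 : hyp.contains "tau = 0" <;> cases di <;> simp

theorem pv_g3 (hyp : List String) :
    (pvLabel hyp [("alpha_bg = alpha_br", "H1")] none).toList
      = if hyp.contains "alpha_bg = alpha_br" = true then ["H1"] else [] := by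
  simp only [pvLabel, List.find?]
  cases h1 : hyp.contains "alpha_bg = alpha_br" <;> simp

theorem pv_g4 (hyp : List String) :
    (pvLabel hyp [("beta_g = beta_r", "H2a"), ("beta_g = 1.5*beta_r", "H2b")] none).toList
      = if hyp.contains "beta_g = beta_r" = true then ["H2a"]
        else if hyp.contains "beta_g = 1.5*beta_r" = true then ["H2b"] else [] := by
  simp only [pvLabel, List.find?]
  cases h1 : hyp.contains "beta_g = beta_r" <;> cases h2 : hyp.contains "beta_g = 1.5*beta_r" <;> simp

theorem pv_g5 (hyp : List String) :
    (pvLabel hyp [("phi_r = phi_g", "H3a"), ("phi_r = 3*phi_g", "H3b"), ("phi_r = 6*phi_g", "H3c")] none).toList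
      = if hyp.contains "phi_r = phi_g" = true then ["H3a"]
        else if hyp.contains "phi_r = 3*phi_g" = true then ["H3b"]
        else if hyp.contains "phi_r = 6*phi_g" = true then ["H3c"] else [] := by
  simp only [pvLabel, List.find?]
  cases h1 : hyp.contains "phi_r = phi_g" <;> cases h2 : hyp.contains "phi_r = 3*phi_g" <;>
    cases h3 : hyp.contains "phi_r = 6*phi_g" <;> simp

theorem pv_g6 (hyp : List String) :
    (pvLabel hyp [("f_Eg = 1.0*phi_r/phi_g*f_Er", "H4a"), ("f_Eg = 1.5*phi_r/phi_g*f_Er", "H4b")] none).toList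
      = if hyp.contains "f_Eg = 1.0*phi_r/phi_g*f_Er" = true then ["H4a"]
        else if hyp.contains "f_Eg = 1.5*phi_r/phi_g*f_Er" = true then ["H4b"] else [] := by
  simp only [pvLabel, List.find?]
  cases h1 : hyp.contains "f_Eg = 1.0*phi_r/phi_g*f_Er" <;>
    cases h2 : hyp.contains "f_Eg = 1.5*phi_r/phi_g*f_Er" <;> simp

theorem pv_g7 (hyp : List String) :
    (pvLabel hyp [("alpha_lg = alpha_lr", "H5")] none).toList
      = if hyp.contains "alpha_lg = alpha_lr" = true then ["H5"] else [] := by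
  simp only [pvLabel, List.find?]
  cases h1 : hyp.contains "alpha_lg = alpha_lr" <;> simp

-- B's group walk, written as the concatenation of the seven if-trees
theorem pv_fm_groups (hyp : List String) (di : Bool) :
    (pvGroups di).filterMap (fun g => pvLabel hyp g.1 g.2)
    = (if (hyp.contains "K_b = inf" || hyp.contains "K_l = inf") = true then ["EG"] else ["LG"]) ++
      ((if hyp.contains "tau = 0" = true then ["NDI"] else if di = true then ["DI"] else []) ++
       ((if hyp.contains "alpha_bg = alpha_br" = true then ["H1"] else []) ++
        ((if hyp.contains "beta_g = beta_r" = true then ["H2a"]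
          else if hyp.contains "beta_g = 1.5*beta_r" = true then ["H2b"] else []) ++
         ((if hyp.contains "phi_r = phi_g" = true then ["H3a"]
           else if hyp.contains "phi_r = 3*phi_g" = true then ["H3b"]
           else if hyp.contains "phi_r = 6*phi_g" = true then ["H3c"] else []) ++
          ((if hyp.contains "f_Eg = 1.0*phi_r/phi_g*f_Er" = true then ["H4a"]
            else if hyp.contains "f_Eg = 1.5*phi_r/phi_g*f_Er" = true then ["H4b"] else []) ++
           (if hyp.contains "alpha_lg = alpha_lr" = true then ["H5"] else [])))))) := by
  simp only [pvGroups, pv_fm_cons, List.filterMap_nil, List.append_nil]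
  rw [pv_g1, pv_g2, pv_g3, pv_g4, pv_g5, pv_g6, pv_g7]

-- A's ladder body over abstract membership booleans equals that concatenation
set_option maxHeartbeats 1000000 in
theorem pv_body_bools (c1 c2 c3 c4 c5 c6 c7 c8 c9 c10 c11 c12 di : Bool) :
    (let h : List String := []
     let h := if c1 || c2 then h ++ ["EG"] else h ++ ["LG"]
     let h := if c3 then h ++ ["NDI"] else if di then h ++ ["DI"] else h
     let h := if c4 then h ++ ["H1"] else h
     let h := if c5 then h ++ ["H2a"] else if c6 then h ++ ["H2b"] else h
     let h := if c7 then h ++ ["H3a"] else if c8 then h ++ ["H3b"] else if c9 then h ++ ["H3c"] else h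
     let h := if c10 then h ++ ["H4a"] else if c11 then h ++ ["H4b"] else h
     let h := if c12 then h ++ ["H5"] else h
     h)
    = (if (c1 || c2) = true then ["EG"] else ["LG"]) ++
      ((if c3 = true then ["NDI"] else if di = true then ["DI"] else []) ++
       ((if c4 = true then ["H1"] else []) ++
        ((if c5 = true then ["H2a"] else if c6 = true then ["H2b"] else []) ++
         ((if c7 = true then ["H3a"] else if c8 = true then ["H3b"] else if c9 = true then ["H3c"] else []) ++
          ((if c10 = true then ["H4a"] else if c11 = true then ["H4b"] else []) ++
           (if c12 = true then ["H5"] else [])))))) := by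
  cases c1 <;> cases c2 <;> cases c3 <;> cases di <;> cases c4 <;> cases c5 <;> cases c6 <;>
    cases c7 <;> cases c8 <;> cases c9 <;> cases c10 <;> cases c11 <;> cases c12 <;> rfl

theorem Constraints_to_hypothesis_spec' (constraints : List (List String)) :
    Constraints_to_hypothesis constraints = Constraints_to_hypothesis_alt constraints := by
  unfold Constraints_to_hypothesis Constraints_to_hypothesis_alt
  rw [PySem.List.foldl_append_singleton_eq_map]
  refine List.map_congr_left (fun hyp _ => ?_)
  rw [pv_fm_groups]
  exact pv_body_bools (hyp.contains "K_b = inf") (hyp.contains "K_l = inf")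
    (hyp.contains "tau = 0") (hyp.contains "alpha_bg = alpha_br")
    (hyp.contains "beta_g = beta_r") (hyp.contains "beta_g = 1.5*beta_r")
    (hyp.contains "phi_r = phi_g") (hyp.contains "phi_r = 3*phi_g")
    (hyp.contains "phi_r = 6*phi_g") (hyp.contains "f_Eg = 1.0*phi_r/phi_g*f_Er")
    (hyp.contains "f_Eg = 1.5*phi_r/phi_g*f_Er") (hyp.contains "alpha_lg = alpha_lr")
    (constraints.contains ["tau = 0"])

-- ===== VERDICT (by name: the statement is the Claim_ definition above) =====
theorem Constraints_to_hypothesis_spec : Claim_equal_Constraints_to_hypothesis := by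
  intro constraints _
  exact Constraints_to_hypothesis_spec' constraints
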